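-- pv_equiv track=rewrite | github.com/xNitix/ASD_AGH_2023 | Dynamic Programming/dynamiki/bit/pociagi_zach.py | peron
-- ===== SOURCE A (Python) =====
-- from queue import PriorityQueue
--
-- def peron(T,m):
--     n = len(T)
--     Que = PriorityQueue()
--     for i in range(n):
--         Que.put([T[i][0],1])
--         Que.put([T[i][1],-1])
--
--     cnt = 0
--
--     while not Que.empty():
--         per,co = Que.get()
--
--         if co == 1:
--             cnt+=1
--         else:
--             cnt -= 1
--
--         if cnt > m:
--             return False
--
--     return True
-- ===== SOURCE B (Python) =====
-- def peron(T, m):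
--     c = 0
--     for p in sorted({a for a, b in T} | {b for a, b in T}):
--         e = sum(1 for _, b in T if b == p)
--         s = sum(1 for a, _ in T if a == p)
--         if e and c - 1 > m:
--             return False
--         c += s - e
--         if s and c > m:
--             return False
--     return True
-- ===== Notes on version B (the rewrite author's own statement) =====
-- stated objective: alternative
-- what changed: Replaces the priority-queue sweep over 2n individual +1/-1 events with a group-by-coordinate pass: iterate the sorted set of distinct positions, count the starts and ends at each position, and test that position's block extrema (c-1 if any end, c+s-e if any start) in closed form, so no per-event counter updates remain.
import Mathlib
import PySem

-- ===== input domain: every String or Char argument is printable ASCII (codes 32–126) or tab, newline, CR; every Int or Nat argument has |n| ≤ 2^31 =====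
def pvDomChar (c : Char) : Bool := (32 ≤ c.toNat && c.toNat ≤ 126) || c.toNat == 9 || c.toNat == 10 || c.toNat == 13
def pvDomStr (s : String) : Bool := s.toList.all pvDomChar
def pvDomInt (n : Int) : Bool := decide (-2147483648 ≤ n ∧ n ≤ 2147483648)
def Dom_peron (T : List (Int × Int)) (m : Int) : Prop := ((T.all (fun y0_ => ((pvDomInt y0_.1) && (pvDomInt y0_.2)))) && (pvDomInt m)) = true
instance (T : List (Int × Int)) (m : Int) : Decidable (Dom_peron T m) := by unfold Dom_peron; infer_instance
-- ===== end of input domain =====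

-- B replaces A's priority-queue sweep over 2n individual ±1 events by a group-by-coordinate pass
-- over the sorted set of distinct positions, testing each position's block extrema in closed form:
-- a genuinely different decomposition, not faster (O(n·k) vs O(n log n)).


-- ===== PORT A =====
-- the queue after the for-loop: one [pos, co] entry per put; PriorityQueue pops these
-- 2-element lists in ascending lexicographic order = sorted with the tuple key (pos, co)
def peronQueue (T : List (Int × Int)) : List (Int × Int) :=
  T.foldl (fun q t => q ++ [(t.1, 1), (t.2, -1)]) []

-- the while-loop popping events in ascending order
def peronLoop (m : Int) : List (Int × Int) → Int → Bool
  | [], _ => true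
  | (_, co) :: rest, cnt =>
    let cnt' := if co == 1 then cnt + 1 else cnt - 1
    if cnt' > m then false else peronLoop m rest cnt'

def peron (T : List (Int × Int)) (m : Int) : Bool :=
  peronLoop m (PySem.List.sorted2 (peronQueue T) (fun x => x.1) (fun x => x.2)) 0

-- ===== PORT B =====
-- the two generator-sums: e = number of intervals ending at p, s = number starting at p
def peronEnds (T : List (Int × Int)) (p : Int) : Nat := T.countP (fun t => t.2 == p)
def peronStarts (T : List (Int × Int)) (p : Int) : Nat := T.countP (fun t => t.1 == p)

-- the for-loop over the sorted distinct positions, with the block checks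
def peronScanB (T : List (Int × Int)) (m : Int) : List Int → Int → Bool
  | [], _ => true
  | p :: ps, c =>
    let e := peronEnds T p
    let s := peronStarts T p
    if 0 < e ∧ c - 1 > m then false
    else
      let c' := c + (s : Int) - (e : Int)
      if 0 < s ∧ c' > m then false else peronScanB T m ps c'

def peron_alt (T : List (Int × Int)) (m : Int) : Bool :=
  peronScanB T m
    (PySem.List.sorted
      (PySem.Set.union (PySem.Set.ofList (T.map (fun t => t.1))) (T.map (fun t => t.2)))
      (fun x => x) false) 0

-- ===== PRECONDITION & SPEC =====
def Spec_peron (T : List (Int × Int)) (m : Int) (out : Bool) : Prop := out = peron_alt T m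
instance (T : List (Int × Int)) (m : Int) (out : Bool) : Decidable (Spec_peron T m out) := by unfold Spec_peron; infer_instance

-- ===== CLAIM (what is proved, stated in full; the proofs are below) =====
def Claim_equal_peron : Prop := ∀ (T : List (Int × Int)) (m : Int), Dom_peron T m → Spec_peron T m (peron T m)

-- ===== LEMMAS AND PROOFS =====

-- the per-position block of A's event stream: all ends at p, then all starts at p
def pBlock (T : List (Int × Int)) (p : Int) : List (Int × Int) :=
  List.replicate (peronEnds T p) (p, -1) ++ List.replicate (peronStarts T p) (p, 1)

-- lexicographic order on events, as the Python list/tuple comparison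
theorem lexle_mk {a b c d : Int} (h : a < c ∨ (a = c ∧ b ≤ d)) : toLex (a, b) ≤ toLex (c, d) :=
  Prod.Lex.toLex_le_toLex.mpr h

-- sorted2's comparator is the strict lexicographic order
theorem before_eq_lex :
    (fun (a b : Int × Int) => decide (a.1 < b.1) || (!decide (b.1 < a.1) && decide (a.2 < b.2)))
      = fun a b => decide (toLex a < toLex b) := by
  funext a b
  by_cases h1 : a.1 < b.1 <;> by_cases h2 : b.1 < a.1 <;> by_cases h3 : a.2 < b.2 <;>
    simp [h1, h2, h3, Prod.Lex.toLex_lt_toLex] <;> omega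

theorem foldl_insertBy_pairwise_lex (xs acc : List (Int × Int))
    (hacc : acc.Pairwise (fun a b => toLex a ≤ toLex b)) :
    (xs.foldl (fun acc x => PySem.List.insertBy (fun a b => decide (toLex a < toLex b)) x acc) acc).Pairwise
      (fun a b => toLex a ≤ toLex b) := by
  induction xs generalizing acc with
  | nil => exact hacc
  | cons x xs ih =>
      exact ih _ (PySem.List.insertBy_pairwise_le (fun y => toLex y) x acc hacc)

-- sorted2 with keys (fst, snd) is pairwise-sorted for the lexicographic order
theorem sorted2_pairwise_lex (xs : List (Int × Int)) :
    (PySem.List.sorted2 xs (fun x => x.1) (fun x => x.2)).Pairwise (fun a b => toLex a ≤ toLex b) := by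
  have hdef : PySem.List.sorted2 xs (fun x => x.1) (fun x => x.2)
      = xs.foldl (fun acc x => PySem.List.insertBy
          (fun a b => decide (a.1 < b.1) || (!decide (b.1 < a.1) && decide (a.2 < b.2))) x acc) [] := rfl
  rw [hdef, before_eq_lex]
  exact foldl_insertBy_pairwise_lex xs [] List.Pairwise.nil

-- the queue contents are a rearrangement of start events and end events
theorem peronQueue_perm (T : List (Int × Int)) :
    (peronQueue T).Perm ((T.map (fun t => t.1)).map (fun s => (s, (1:Int)))
      ++ (T.map (fun t => t.2)).map (fun e => (e, (-1:Int)))) := by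
  unfold peronQueue
  rw [PySem.List.foldl_append_eq_flatMap]
  simp only [List.nil_append]
  induction T with
  | nil => simp
  | cons t T ih =>
      simp only [List.flatMap_cons, List.map_cons, List.cons_append]
      refine List.Perm.cons _ ?_
      exact (ih.cons _).trans List.perm_middle.symm

-- counting a tagged pair in a tagged map
theorem count_map_tag (xs : List Int) (c q v : Int) :
    ((xs.map (fun x => (x, c))).count (q, v)) = if v = c then xs.count q else 0 := by
  induction xs with
  | nil => simp
  | cons x xs ih =>
      simp only [List.map_cons, List.count_cons, ih]
      by_cases hv : v = c <;> by_cases hx : x = q <;>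
        first
        | (simp [hv, hx, Prod.ext_iff]; omega)
        | simp [hv, hx, Prod.ext_iff]

-- membership in a flatMap of blocks determines the first coordinate
theorem mem_blocks_fst (T : List (Int × Int)) (P : List Int) (x : Int × Int)
    (hx : x ∈ P.flatMap (pBlock T)) : x.1 ∈ P := by
  rcases List.mem_flatMap.mp hx with ⟨p, hp, hxp⟩
  unfold pBlock at hxp
  rcases List.mem_append.mp hxp with h | h <;>
    · rcases List.eq_of_mem_replicate h with rfl; exact hp

-- counting a tagged pair in the blocks of a Nodup position list
theorem count_blocks (T : List (Int × Int)) (P : List Int) (hnd : P.Nodup) (q v : Int) :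
    ((P.flatMap (pBlock T)).count (q, v))
      = if q ∈ P then
          (if v = -1 then peronEnds T q else if v = 1 then peronStarts T q else 0)
        else 0 := by
  induction P with
  | nil => simp
  | cons p ps ih =>
      rcases List.nodup_cons.mp hnd with ⟨hp, hnd'⟩
      simp only [List.flatMap_cons, List.count_append, ih hnd']
      unfold pBlock
      rw [List.count_append, List.count_replicate, List.count_replicate]
      by_cases hq : q = p
      · subst hq
        simp only [List.mem_cons, true_or, if_pos]
        rw [if_neg hp]
        by_cases hv1 : v = -1
        · subst hv1; simp
        · by_cases hv2 : v = 1
          · subst hv2; simp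
          · simp [Prod.ext_iff, hv1, hv2]
            constructor <;> (intro h; omega)
      · have h1 : ¬ (((p, (-1:Int)) : Int × Int) == (q, v)) = true := by
          simp [Prod.ext_iff]; intro h; omega
        have h2 : ¬ (((p, (1:Int)) : Int × Int) == (q, v)) = true := by
          simp [Prod.ext_iff]; intro h; omega
        rw [if_neg h1, if_neg h2]
        have hmem : q ∈ p :: ps ↔ q ∈ ps := by simp [List.mem_cons, hq]
        by_cases hin : q ∈ ps
        · rw [if_pos hin, if_pos (hmem.mpr hin)]; simp
        · rw [if_neg hin, if_neg (fun h => hin (hmem.mp h))]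

-- the queue is a permutation of the per-position blocks
theorem queue_perm_blocks (T : List (Int × Int)) (P : List Int) (hnd : P.Nodup)
    (hmem : ∀ q : Int, q ∈ P ↔ q ∈ T.map (fun t => t.1) ++ T.map (fun t => t.2)) :
    (peronQueue T).Perm (P.flatMap (pBlock T)) := by
  refine (peronQueue_perm T).trans (List.perm_iff_count.mpr ?_)
  rintro ⟨q, v⟩
  rw [count_blocks T P hnd q v, List.count_append, count_map_tag, count_map_tag]
  have hstart : (T.map (fun t => t.1)).count q = peronStarts T q := by
    unfold peronStarts; rw [List.count_eq_countP, List.countP_map]; rfl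
  have hend : (T.map (fun t => t.2)).count q = peronEnds T q := by
    unfold peronEnds; rw [List.count_eq_countP, List.countP_map]; rfl
  by_cases hq : q ∈ P
  · rw [if_pos hq]
    by_cases hv1 : v = -1
    · subst hv1; simp [hend]
    · by_cases hv2 : v = 1
      · subst hv2; simp [hstart]
      · simp [hv1, hv2]
  · rw [if_neg hq]
    have hq' := (not_iff_not.mpr (hmem q)).mp hq
    rw [List.mem_append] at hq'
    push Not at hq'
    have hs0 : (T.map (fun t => t.1)).count q = 0 := List.count_eq_zero.mpr hq'.1
    have he0 : (T.map (fun t => t.2)).count q = 0 := List.count_eq_zero.mpr hq'.2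
    by_cases hv1 : v = -1
    · subst hv1; simp [he0]
    · by_cases hv2 : v = 1
      · subst hv2; simp [hs0]
      · simp [hv1, hv2]

-- the blocks of a strictly increasing position list are lexicographically sorted
theorem blocks_pairwise (T : List (Int × Int)) (P : List Int) (hP : P.Pairwise (· < ·)) :
    (P.flatMap (pBlock T)).Pairwise (fun a b => toLex a ≤ toLex b) := by
  induction P with
  | nil => simp
  | cons p ps ih =>
      rcases List.pairwise_cons.mp hP with ⟨hhead, htail⟩
      simp only [List.flatMap_cons]
      refine List.pairwise_append.mpr ⟨?_, ih htail, ?_⟩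
      · unfold pBlock
        refine List.pairwise_append.mpr ⟨?_, ?_, ?_⟩
        · exact List.pairwise_replicate.mpr (Or.inr le_rfl)
        · exact List.pairwise_replicate.mpr (Or.inr le_rfl)
        · intro a ha b hb
          rcases List.eq_of_mem_replicate ha with rfl
          rcases List.eq_of_mem_replicate hb with rfl
          exact lexle_mk (by omega)
      · intro a ha b hb
        have hb1 : b.1 ∈ ps := mem_blocks_fst T ps b hb
        have hlt := hhead b.1 hb1
        unfold pBlock at ha
        rcases List.mem_append.mp ha with h | h <;>
          · rcases List.eq_of_mem_replicate h with rfl; exact lexle_mk (by left; omega)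

-- A's sorted event stream IS the concatenation of per-position blocks
theorem sorted2_queue_eq_blocks (T : List (Int × Int)) (P : List Int)
    (hnd : P.Nodup) (hP : P.Pairwise (· < ·))
    (hmem : ∀ q : Int, q ∈ P ↔ q ∈ T.map (fun t => t.1) ++ T.map (fun t => t.2)) :
    PySem.List.sorted2 (peronQueue T) (fun x => x.1) (fun x => x.2) = P.flatMap (pBlock T) := by
  refine PySem.List.eq_of_perm_of_pairwise_le_of_injective (fun y => toLex y)
    (Equiv.injective toLex)
    (((PySem.List.sorted2_perm _ _ _ _).trans (queue_perm_blocks T P hnd hmem)))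
    (sorted2_pairwise_lex _) (blocks_pairwise T P hP)

-- a run of e end events: trips iff the first one does, else lands on c - e
theorem loop_run_end (m : Int) (p : Int) (e : Nat) (rest : List (Int × Int)) (c : Int) :
    peronLoop m (List.replicate e (p, -1) ++ rest) c
      = if 0 < e ∧ c - 1 > m then false else peronLoop m rest (c - e) := by
  induction e generalizing c with
  | zero => simp
  | succ e' ih =>
      simp only [List.replicate_succ, List.cons_append, peronLoop]
      have hco : ¬ (((-1:Int) == 1) = true) := by decide
      simp only [hco, if_false, Bool.false_eq_true]
      by_cases hc : c - 1 > m
      · rw [if_pos hc, if_pos ⟨Nat.succ_pos e', hc⟩]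
      · rw [if_neg hc, ih (c - 1), if_neg (by omega)]
        rw [if_neg (fun h => hc (by omega))]
        congr 1
        push_cast
        omega

-- a run of s start events: trips iff the last one does, else lands on c + s
theorem loop_run_start (m : Int) (p : Int) (s : Nat) (rest : List (Int × Int)) (c : Int) :
    peronLoop m (List.replicate s (p, 1) ++ rest) c
      = if 0 < s ∧ c + s > m then false else peronLoop m rest (c + s) := by
  induction s generalizing c with
  | zero => simp
  | succ s' ih =>
      simp only [List.replicate_succ, List.cons_append, peronLoop]
      have hco : (((1:Int) == 1) = true) := by decide
      simp only [hco, if_true]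
      by_cases hc : c + 1 > m
      · rw [if_pos hc, if_pos ⟨Nat.succ_pos s', by push_cast; omega⟩]
      · rw [if_neg hc, ih (c + 1)]
        by_cases hs : 0 < s' ∧ c + 1 + (s' : Int) > m
        · rw [if_pos hs, if_pos ⟨Nat.succ_pos s', by push_cast; omega⟩]
        · rw [if_neg hs, if_neg (by push_cast at hs ⊢; omega)]
          congr 1
          push_cast
          omega

-- A's event loop over the blocks equals B's per-position scan
theorem loop_blocks (T : List (Int × Int)) (m : Int) (P : List Int) (c : Int) :
    peronLoop m (P.flatMap (pBlock T)) c = peronScanB T m P c := by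
  induction P generalizing c with
  | nil => rfl
  | cons p ps ih =>
      simp only [List.flatMap_cons, pBlock, List.append_assoc]
      rw [loop_run_end, peronScanB]
      by_cases h1 : 0 < peronEnds T p ∧ c - 1 > m
      · rw [if_pos h1, if_pos h1]
      · rw [if_neg h1, if_neg h1, loop_run_start]
        by_cases h2 : 0 < peronStarts T p
          ∧ c - (peronEnds T p : Int) + (peronStarts T p : Int) > m
        · rw [if_pos h2, if_pos (by omega)]
        · rw [if_neg h2, if_neg (by omega), ih]
          congr 1
          omega

-- ===== VERDICT (by name: the statement is the Claim_ definition above) =====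
theorem peron_spec : Claim_equal_peron := by
  intro T m _
  unfold Spec_peron peron peron_alt
  have hunion : PySem.Set.union (PySem.Set.ofList (T.map (fun t => t.1))) (T.map (fun t => t.2))
      = PySem.Set.ofList (T.map (fun t => t.1) ++ T.map (fun t => t.2)) := by
    simp [PySem.Set.union, PySem.Set.update, PySem.Set.ofList_eq_foldl, List.foldl_append]
  rw [hunion]
  set P := PySem.List.sorted (PySem.Set.ofList (T.map (fun t => t.1) ++ T.map (fun t => t.2)))
    (fun x => x) false with hPdef
  have hpw : P.Pairwise (· < ·) := PySem.List.sorted_ofList_pairwise_lt _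
  have hmem : ∀ q : Int, q ∈ P ↔ q ∈ T.map (fun t => t.1) ++ T.map (fun t => t.2) := by
    intro q
    rw [hPdef, PySem.List.mem_sorted, PySem.Set.mem_ofList]
  rw [sorted2_queue_eq_blocks T P hpw.nodup hpw hmem, loop_blocks]
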